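-- pv_equiv track=rewrite | github.com/sodes-proxy/compiler-project | analizador_sintactico.py | expresion_booleana
-- ===== SOURCE A (Python) =====
-- T_VAR = ["ENTERO", "ALFABETICO", "REAL", "LOGICO"]
--
-- def expresion_booleana(op):
--     flag = True
--     expresiones = []
--     split1 = op.split(" Y ")
--     for split in split1:
--         for expr in split.split(" O "):
--             expresiones.append(expr)
--
--     for expr in expresiones:
--         temp_flag = False
--         if not expr: continue
--         if expr in [f"IDENTIFICADOR NOIGUAL {key}" for key in T_VAR] + [f"IDENTIFICADOR NOIGUAL {key} " for key in T_VAR]: temp_flag = True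
--         elif expr in [f"IDENTIFICADOR IGUAL {key}" for key in T_VAR] + [f"IDENTIFICADOR IGUAL {key} " for key in T_VAR]: temp_flag = True
--         elif expr in [f"IDENTIFICADOR MENOR {key}" for key in T_VAR if key not in ["LOGICO", "ALFABETICO"]] + [f"IDENTIFICADOR MENOR {key} " for key in T_VAR if key not in ["LOGICO", "ALFABETICO"]]: temp_flag = True
--         elif expr in [f"IDENTIFICADOR MAYOR {key}" for key in T_VAR if key not in ["LOGICO", "ALFABETICO"]] + [f"IDENTIFICADOR MAYOR {key} " for key in T_VAR if key not in ["LOGICO", "ALFABETICO"]]: temp_flag = True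
--         elif expr in [f"IDENTIFICADOR MENORIGUAL {key}" for key in T_VAR if key not in ["LOGICO", "ALFABETICO"]] + [f"IDENTIFICADOR MENORIGUAL {key} " for key in T_VAR if key not in ["LOGICO", "ALFABETICO"]]: temp_flag = True
--         elif expr in [f"IDENTIFICADOR MAYORIGUAL {key}" for key in T_VAR if key not in ["LOGICO", "ALFABETICO"]] + [f"IDENTIFICADOR MAYORIGUAL {key} " for key in T_VAR if key not in ["LOGICO", "ALFABETICO"]]: temp_flag = True
--         elif expr in ["NO IDENTIFICADOR", "NO IDENTIFICADOR "]: temp_flag = True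
--
--         if not temp_flag:
--             flag = False
--             break
--     return flag
--
--
--     return flag
-- ===== SOURCE B (Python) =====
-- T_VAR = ["ENTERO", "ALFABETICO", "REAL", "LOGICO"]
--
-- # B is a grammar parser: instead of enumerating every accepted token string,
-- # it strips an optional single trailing space, then recognises the negation
-- # production and the identifier-relation-type production by prefix-stripping,
-- # where ordering relations only allow numeric types.
-- _RELS = [("NOIGUAL", T_VAR), ("IGUAL", T_VAR),
--          ("MENOR", ["ENTERO", "REAL"]), ("MAYOR", ["ENTERO", "REAL"]),
--          ("MENORIGUAL", ["ENTERO", "REAL"]), ("MAYORIGUAL", ["ENTERO", "REAL"])]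
--
-- def _valid(e):
--     if e.endswith(" "):
--         e = e[:-1]
--     if e == "NO IDENTIFICADOR":
--         return True
--     if not e.startswith("IDENTIFICADOR "):
--         return False
--     rest = e[len("IDENTIFICADOR "):]
--     for rel, types in _RELS:
--         if rest.startswith(rel + " "):
--             return rest[len(rel) + 1:] in types
--     return False
--
-- def expresion_booleana(op):
--     return all(not e or _valid(e)
--                for part in op.split(" Y ") for e in part.split(" O "))
-- ===== Notes on version B (the rewrite author's own statement) =====
-- stated objective: alternative
-- what changed: Replaces A's seven elif membership lists of enumerated token strings (rebuilt on every call) with a small grammar parser that strips one optional trailing space and recognises the negation production and the identifier-relation-type production by prefix-stripping, restricting ordering relations to numeric types.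
import Mathlib
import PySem

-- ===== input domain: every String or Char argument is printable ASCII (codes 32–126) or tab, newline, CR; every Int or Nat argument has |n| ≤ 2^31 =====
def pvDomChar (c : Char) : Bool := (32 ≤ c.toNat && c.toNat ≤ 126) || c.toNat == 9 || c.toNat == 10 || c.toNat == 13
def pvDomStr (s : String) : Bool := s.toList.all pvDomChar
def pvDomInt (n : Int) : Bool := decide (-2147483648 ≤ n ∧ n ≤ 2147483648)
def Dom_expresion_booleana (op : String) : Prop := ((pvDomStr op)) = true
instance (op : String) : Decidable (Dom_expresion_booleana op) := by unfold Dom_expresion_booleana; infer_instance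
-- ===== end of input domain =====

-- B replaces A's seven elif membership lists of enumerated token strings by a small
-- grammar parser (strip one optional trailing space, then recognise the negation
-- production or the identifier-relation-type production by prefix-stripping); objective: alternative.

-- ===== PORT A =====
def pvTVAR : List String := ["ENTERO", "ALFABETICO", "REAL", "LOGICO"]

-- the body of A's per-expression elif chain (temp_flag)
def pvCheckA (expr : String) : Bool :=
  if (pvTVAR.map (fun key => "IDENTIFICADOR NOIGUAL " ++ key)
      ++ pvTVAR.map (fun key => "IDENTIFICADOR NOIGUAL " ++ key ++ " ")).contains expr then true
  else if (pvTVAR.map (fun key => "IDENTIFICADOR IGUAL " ++ key)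
      ++ pvTVAR.map (fun key => "IDENTIFICADOR IGUAL " ++ key ++ " ")).contains expr then true
  else if ((pvTVAR.filter (fun key => !(["LOGICO", "ALFABETICO"].contains key))).map (fun key => "IDENTIFICADOR MENOR " ++ key)
      ++ (pvTVAR.filter (fun key => !(["LOGICO", "ALFABETICO"].contains key))).map (fun key => "IDENTIFICADOR MENOR " ++ key ++ " ")).contains expr then true
  else if ((pvTVAR.filter (fun key => !(["LOGICO", "ALFABETICO"].contains key))).map (fun key => "IDENTIFICADOR MAYOR " ++ key)
      ++ (pvTVAR.filter (fun key => !(["LOGICO", "ALFABETICO"].contains key))).map (fun key => "IDENTIFICADOR MAYOR " ++ key ++ " ")).contains expr then true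
  else if ((pvTVAR.filter (fun key => !(["LOGICO", "ALFABETICO"].contains key))).map (fun key => "IDENTIFICADOR MENORIGUAL " ++ key)
      ++ (pvTVAR.filter (fun key => !(["LOGICO", "ALFABETICO"].contains key))).map (fun key => "IDENTIFICADOR MENORIGUAL " ++ key ++ " ")).contains expr then true
  else if ((pvTVAR.filter (fun key => !(["LOGICO", "ALFABETICO"].contains key))).map (fun key => "IDENTIFICADOR MAYORIGUAL " ++ key)
      ++ (pvTVAR.filter (fun key => !(["LOGICO", "ALFABETICO"].contains key))).map (fun key => "IDENTIFICADOR MAYORIGUAL " ++ key ++ " ")).contains expr then true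
  else if (["NO IDENTIFICADOR", "NO IDENTIFICADOR "]).contains expr then true
  else false

-- A's second for-loop: continue on empty, break (return False) on the first failing token
def pvLoopA : List String → Bool
  | [] => true
  | e :: rest =>
      if e = "" then pvLoopA rest
      else if pvCheckA e then pvLoopA rest
      else false

def expresion_booleana (op : String) : Bool :=
  let split1 := (PySem.Str.split? op " Y ").getD []
  let expresiones := split1.foldl
    (fun acc s => ((PySem.Str.split? s " O ").getD []).foldl (fun acc2 e => acc2 ++ [e]) acc) []
  pvLoopA expresiones

-- ===== PORT B =====
-- Source B's _RELS table: relation keyword, allowed right-hand types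
def pvRELS : List (String × List String) :=
  [("NOIGUAL", pvTVAR), ("IGUAL", pvTVAR),
   ("MENOR", ["ENTERO", "REAL"]), ("MAYOR", ["ENTERO", "REAL"]),
   ("MENORIGUAL", ["ENTERO", "REAL"]), ("MAYORIGUAL", ["ENTERO", "REAL"])]

-- Source B's `for rel, types in _RELS` loop with its early return
def pvFindRel : List (String × List String) → String → Bool
  | [], _ => false
  | (rel, types) :: rs, rest =>
      if PySem.Str.startswith rest (rel ++ " ") then
        types.contains (PySem.Str.slice rest (some ((PySem.Str.len rel : Int) + 1)) none)
      else pvFindRel rs rest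

-- Source B's _valid: strip one optional trailing space, then parse the two productions
def pvValidB (e : String) : Bool :=
  let e1 := if PySem.Str.endswith e " " then PySem.Str.slice e none (some (-1)) else e
  if e1 = "NO IDENTIFICADOR" then true
  else if !(PySem.Str.startswith e1 "IDENTIFICADOR ") then false
  else pvFindRel pvRELS (PySem.Str.slice e1 (some ((PySem.Str.len "IDENTIFICADOR " : Int))) none)

def expresion_booleana_alt (op : String) : Bool :=
  (((PySem.Str.split? op " Y ").getD []).flatMap
      (fun part => (PySem.Str.split? part " O ").getD [])).all
    (fun e => e == "" || pvValidB e)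

-- ===== PRECONDITION & SPEC =====
def Spec_expresion_booleana (op : String) (out : Bool) : Prop := out = expresion_booleana_alt op
instance (op : String) (out : Bool) : Decidable (Spec_expresion_booleana op out) := by unfold Spec_expresion_booleana; infer_instance

-- ===== CLAIM (what is proved, stated in full; the proofs are below) =====
def Claim_equal_expresion_booleana : Prop := ∀ (op : String), Dom_expresion_booleana op → Spec_expresion_booleana op (expresion_booleana op)

-- ===== LEMMAS AND PROOFS =====

-- A's seven lists, concatenated in elif order
def pvListA : List String :=
  (pvTVAR.map (fun key => "IDENTIFICADOR NOIGUAL " ++ key)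
      ++ pvTVAR.map (fun key => "IDENTIFICADOR NOIGUAL " ++ key ++ " "))
  ++ ((pvTVAR.map (fun key => "IDENTIFICADOR IGUAL " ++ key)
      ++ pvTVAR.map (fun key => "IDENTIFICADOR IGUAL " ++ key ++ " "))
  ++ (((pvTVAR.filter (fun key => !(["LOGICO", "ALFABETICO"].contains key))).map (fun key => "IDENTIFICADOR MENOR " ++ key)
      ++ (pvTVAR.filter (fun key => !(["LOGICO", "ALFABETICO"].contains key))).map (fun key => "IDENTIFICADOR MENOR " ++ key ++ " "))
  ++ (((pvTVAR.filter (fun key => !(["LOGICO", "ALFABETICO"].contains key))).map (fun key => "IDENTIFICADOR MAYOR " ++ key)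
      ++ (pvTVAR.filter (fun key => !(["LOGICO", "ALFABETICO"].contains key))).map (fun key => "IDENTIFICADOR MAYOR " ++ key ++ " "))
  ++ (((pvTVAR.filter (fun key => !(["LOGICO", "ALFABETICO"].contains key))).map (fun key => "IDENTIFICADOR MENORIGUAL " ++ key)
      ++ (pvTVAR.filter (fun key => !(["LOGICO", "ALFABETICO"].contains key))).map (fun key => "IDENTIFICADOR MENORIGUAL " ++ key ++ " "))
  ++ (((pvTVAR.filter (fun key => !(["LOGICO", "ALFABETICO"].contains key))).map (fun key => "IDENTIFICADOR MAYORIGUAL " ++ key)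
      ++ (pvTVAR.filter (fun key => !(["LOGICO", "ALFABETICO"].contains key))).map (fun key => "IDENTIFICADOR MAYORIGUAL " ++ key ++ " "))
  ++ ["NO IDENTIFICADOR", "NO IDENTIFICADOR "])))))

lemma pv_if_true_left (c b : Bool) : (if c then true else b) = (c || b) := by
  cases c <;> simp

lemma pvCheckA_eq_contains (e : String) : pvCheckA e = pvListA.contains e := by
  simp only [pvCheckA, pvListA, List.contains_append, pv_if_true_left]
  simp [Bool.or_assoc]

-- prefix-stripping reconstructs the string: s = p ++ s[k:] when s startswith p, k = len p
lemma pv_strip (s p : String) (k : Int) (hk : k = (p.toList.length : Int))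
    (h : PySem.Str.startswith s p = true) :
    s.toList = p.toList ++ (PySem.Str.slice s (some k) none).toList := by
  subst hk
  rw [PySem.Str.toList_slice, PySem.Chars.slice_eq_listSlice,
      PySem.List.slice_from _ (by positivity), Int.toNat_natCast]
  have hp : p.toList <+: s.toList := by
    rw [PySem.Str.startswith_eq, PySem.Chars.startswith_iff] at h; exact h
  obtain ⟨t, ht⟩ := hp
  rw [← ht, List.drop_left]

lemma pvFindRel_true (rs : List (String × List String)) (rest : String)
    (h : pvFindRel rs rest = true) :
    ∃ p ∈ rs, PySem.Str.startswith rest (p.1 ++ " ") = true ∧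
      p.2.contains (PySem.Str.slice rest (some ((PySem.Str.len p.1 : Int) + 1)) none) = true := by
  induction rs with
  | nil => simp [pvFindRel] at h
  | cons q rs ih =>
      obtain ⟨rel, types⟩ := q
      rw [pvFindRel] at h
      by_cases hs : PySem.Str.startswith rest (rel ++ " ") = true
      · exact ⟨(rel, types), by simp, hs, by rwa [if_pos hs] at h⟩
      · obtain ⟨p, hp, h1, h2⟩ := ih (by rwa [if_neg hs] at h)
        exact ⟨p, List.mem_cons_of_mem _ hp, h1, h2⟩

-- every well-formed parsed shape is in A's table (finite check)
lemma pv_enum : ∀ p ∈ pvRELS, ∀ t ∈ p.2, ∀ tail ∈ [([] : List Char), [' ']],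
    ∃ x ∈ pvListA, x.toList =
      "IDENTIFICADOR ".toList ++ ((p.1 ++ " ").toList ++ t.toList) ++ tail := by
  decide

-- endswith " " reconstructs: s = s[:-1] ++ " "
lemma pv_endswith (s : String) (h : PySem.Str.endswith s " " = true) :
    s.toList = (PySem.Str.slice s none (some (-1))).toList ++ [' '] := by
  rw [PySem.Str.slice_to_neg_one]
  rw [PySem.Str.endswith_eq, PySem.Chars.endswith_iff] at h
  obtain ⟨t, ht⟩ := h
  rw [← ht]; simp

lemma pv_valid_mem (e : String) (h : pvValidB e = true) : pvListA.contains e = true := by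
  unfold pvValidB at h
  set e1 := if PySem.Str.endswith e " " then PySem.Str.slice e none (some (-1)) else e with he1
  have hsplit : ∃ tail ∈ [([] : List Char), [' ']], e.toList = e1.toList ++ tail := by
    by_cases hw : PySem.Str.endswith e " " = true
    · exact ⟨[' '], by simp, by rw [he1, if_pos hw]; exact pv_endswith e hw⟩
    · exact ⟨[], by simp, by rw [he1, if_neg hw]; simp⟩
  obtain ⟨tail, htl, hsp⟩ := hsplit
  rw [List.contains_eq_mem, decide_eq_true_iff]
  by_cases hno : e1 = "NO IDENTIFICADOR"
  · have : ∃ x ∈ pvListA, x.toList = "NO IDENTIFICADOR".toList ++ tail := by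
      simp only [List.mem_cons, List.not_mem_nil, or_false] at htl
      rcases htl with h' | h'
      · subst h'; exact ⟨"NO IDENTIFICADOR", by decide, by simp⟩
      · subst h'; exact ⟨"NO IDENTIFICADOR ", by decide, by decide⟩
    obtain ⟨x, hx, hxl⟩ := this
    have : e = x := String.toList_inj.mp (by rw [hsp, hno, hxl])
    rwa [this]
  · rw [if_neg hno] at h
    by_cases hst : PySem.Str.startswith e1 "IDENTIFICADOR " = true
    · rw [if_neg (by rw [hst]; decide)] at h
      obtain ⟨p, hp, h1, h2⟩ := pvFindRel_true _ _ h
      set rest := PySem.Str.slice e1 (some ((PySem.Str.len "IDENTIFICADOR " : Int))) none with hrest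
      have he1l : e1.toList = "IDENTIFICADOR ".toList ++ rest.toList :=
        pv_strip e1 "IDENTIFICADOR " _ (by decide) hst
      set typ := PySem.Str.slice rest (some ((PySem.Str.len p.1 : Int) + 1)) none with htyp
      have hrl : rest.toList = (p.1 ++ " ").toList ++ typ.toList := by
        refine pv_strip rest (p.1 ++ " ") _ ?_ h1
        simp only [String.toList_append]
        simp [PySem.Str.len_eq]
      have hmem : typ ∈ p.2 := by rwa [List.contains_eq_mem, decide_eq_true_iff] at h2
      obtain ⟨x, hx, hxl⟩ := pv_enum p hp typ hmem tail htl
      have : e = x := String.toList_inj.mp (by rw [hsp, he1l, hrl, hxl])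
      rwa [this]
    · rw [Bool.not_eq_true] at hst
      rw [hst] at h
      simp at h

lemma pv_mem_valid : ∀ e ∈ pvListA, pvValidB e = true := by decide

lemma pvValidB_eq (e : String) : pvValidB e = pvListA.contains e := by
  by_cases h : pvValidB e = true
  · rw [h, pv_valid_mem e h]
  · rw [Bool.not_eq_true] at h
    rw [h]
    cases hc : pvListA.contains e
    · rfl
    · have hm : e ∈ pvListA := by rwa [List.contains_eq_mem, decide_eq_true_iff] at hc
      exact absurd (pv_mem_valid e hm) (by simp [h])

lemma pvLoopA_eq_all (l : List String) :
    pvLoopA l = l.all (fun e => e == "" || pvValidB e) := by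
  induction l with
  | nil => rfl
  | cons e rest ih =>
      by_cases he : e = ""
      · simp [pvLoopA, he, ih]
      · rw [pvLoopA, if_neg he, pvCheckA_eq_contains, ← pvValidB_eq, List.all_cons, ← ih]
        cases h : pvValidB e
        · simp [he, h]
        · simp [h]

lemma pv_build_eq (split1 : List String) :
    split1.foldl
      (fun acc s => ((PySem.Str.split? s " O ").getD []).foldl (fun acc2 e => acc2 ++ [e]) acc) []
    = split1.flatMap (fun part => (PySem.Str.split? part " O ").getD []) := by
  have h : ∀ (s : String) (acc : List String),
      ((PySem.Str.split? s " O ").getD []).foldl (fun acc2 e => acc2 ++ [e]) acc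
        = acc ++ (PySem.Str.split? s " O ").getD [] := by
    intro s acc; exact PySem.List.foldl_append_singleton _ _
  calc split1.foldl
        (fun acc s => ((PySem.Str.split? s " O ").getD []).foldl (fun acc2 e => acc2 ++ [e]) acc) []
      = split1.foldl (fun acc s => acc ++ (PySem.Str.split? s " O ").getD []) [] := by
        exact PySem.List.foldl_congr_mem split1 _ _ [] (fun acc s _ => h s acc)
    _ = split1.flatMap (fun part => (PySem.Str.split? part " O ").getD []) := by
        simpa using PySem.List.foldl_append_eq_flatMap
          (fun part => (PySem.Str.split? part " O ").getD []) split1 []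

-- ===== VERDICT (by name: the statement is the Claim_ definition above) =====
theorem expresion_booleana_spec : Claim_equal_expresion_booleana := by
  intro op _
  unfold Spec_expresion_booleana expresion_booleana expresion_booleana_alt
  simp only [pv_build_eq, pvLoopA_eq_all]
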